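-- pv_equiv track=rewrite | github.com/Nostalogicwh/Leetcode | e_速算机器人/1614.py | calculate
-- ===== SOURCE A (Python) =====
-- def calculate(s: str) -> int:
--     x,y = 1,0
--     for i in s:
--         if i == 'A':
--             x = 2 * x + y
--         if i == 'B':
--             y = 2 * y + x
--     return x + y
-- ===== SOURCE B (Python) =====
-- def calculate(s: str) -> int:
--     return 2 ** (s.count('A') + s.count('B'))
-- ===== Notes on version B (the rewrite author's own statement) =====
-- stated objective: simpler
-- what changed: Replaces the stateful (x,y) simulation loop with the closed form 2**(count of 'A' plus count of 'B'), using the invariant that each matching character doubles x+y.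
import Mathlib
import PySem

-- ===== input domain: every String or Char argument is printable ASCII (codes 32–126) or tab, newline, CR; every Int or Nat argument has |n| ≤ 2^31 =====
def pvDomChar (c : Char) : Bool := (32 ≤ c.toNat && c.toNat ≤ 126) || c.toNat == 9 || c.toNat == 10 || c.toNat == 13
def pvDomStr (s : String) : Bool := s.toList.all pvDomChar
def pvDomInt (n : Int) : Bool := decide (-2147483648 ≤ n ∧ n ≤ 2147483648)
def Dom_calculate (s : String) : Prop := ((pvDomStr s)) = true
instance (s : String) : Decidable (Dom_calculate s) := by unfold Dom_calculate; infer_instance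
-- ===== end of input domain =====

-- B replaces A's stateful (x,y) simulation with the closed form 2^(count 'A' + count 'B') (simpler).


-- ===== PORT A =====
-- one loop step: both 'if's in order, the second sees the possibly-updated x
def calcStep (xy : Int × Int) (i : Char) : Int × Int :=
  let x := if i = 'A' then 2 * xy.1 + xy.2 else xy.1
  let y := if i = 'B' then 2 * xy.2 + x else xy.2
  (x, y)

def calculate (s : String) : Int :=
  let p := s.toList.foldl calcStep (1, 0)
  p.1 + p.2

-- ===== PORT B =====
-- s.count('A') for a single char equals the count of that char in the char list
def calculate_alt (s : String) : Int :=
  2 ^ (s.toList.count 'A' + s.toList.count 'B')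

-- ===== PRECONDITION & SPEC =====
def Spec_calculate (s : String) (out : Int) : Prop := out = calculate_alt s
instance (s : String) (out : Int) : Decidable (Spec_calculate s out) := by unfold Spec_calculate; infer_instance

-- ===== CLAIM (what is proved, stated in full; the proofs are below) =====
def Claim_equal_calculate : Prop := ∀ (s : String), Dom_calculate s → Spec_calculate s (calculate s)

-- ===== LEMMAS AND PROOFS =====
lemma foldl_calcStep_sum (l : List Char) : ∀ (x y : Int),
    (l.foldl calcStep (x, y)).1 + (l.foldl calcStep (x, y)).2
      = (x + y) * 2 ^ (l.count 'A' + l.count 'B') := by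
  induction l with
  | nil => intro x y; simp
  | cons c t ih =>
    intro x y
    by_cases hA : c = 'A'
    · have hB : c ≠ 'B' := by simp [hA]
      simp only [List.foldl_cons, calcStep, if_pos hA, ih, List.count_cons, hB]
      simp [hA]
      have h : t.count 'A' + 1 + t.count 'B' = (t.count 'A' + t.count 'B') + 1 := by omega
      rw [h, pow_succ]
      ring
    · by_cases hB : c = 'B'
      · simp only [List.foldl_cons, calcStep, if_pos hB, if_neg hA, ih, List.count_cons]
        simp [hB]
        have h : t.count 'A' + (t.count 'B' + 1) = (t.count 'A' + t.count 'B') + 1 := by omega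
        rw [h, pow_succ]
        ring
      · simp only [List.foldl_cons, calcStep, if_neg hA, if_neg hB, ih, List.count_cons]
        simp [hA, hB]

-- ===== VERDICT (by name: the statement is the Claim_ definition above) =====
theorem calculate_spec : Claim_equal_calculate := by
  intro s _
  unfold Spec_calculate calculate calculate_alt
  simpa using foldl_calcStep_sum s.toList 1 0
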